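-- pv_equiv track=rewrite | github.com/Flavio-Luis/calc-comissao-pipeline | scripts/table_payments.py | del_internal_payments
-- ===== SOURCE A (Python) =====
-- def del_internal_payments(variable_correct_payments): # function que apaga os dados de comissão bruto
--
--     for internal_index in variable_correct_payments:
--         cont = 0
--         for value in internal_index:
--             if cont == 1:
--                 del internal_index[1]
--                 cont += 1
--
--             cont += 1
--
--     return variable_correct_payments
-- ===== SOURCE B (Python) =====
-- def del_internal_payments(variable_correct_payments):
--     for sub in variable_correct_payments:
--         if len(sub) > 1:
--             del sub[1]
--     return variable_correct_payments
-- ===== Notes on version B (the rewrite author's own statement) =====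
-- stated objective: simpler
-- what changed: Replaces A's inner element-scan with a sentinel counter by a single guarded `del sub[1]` per sublist (delete index 1 when the sublist has at least two elements).
import Mathlib
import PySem

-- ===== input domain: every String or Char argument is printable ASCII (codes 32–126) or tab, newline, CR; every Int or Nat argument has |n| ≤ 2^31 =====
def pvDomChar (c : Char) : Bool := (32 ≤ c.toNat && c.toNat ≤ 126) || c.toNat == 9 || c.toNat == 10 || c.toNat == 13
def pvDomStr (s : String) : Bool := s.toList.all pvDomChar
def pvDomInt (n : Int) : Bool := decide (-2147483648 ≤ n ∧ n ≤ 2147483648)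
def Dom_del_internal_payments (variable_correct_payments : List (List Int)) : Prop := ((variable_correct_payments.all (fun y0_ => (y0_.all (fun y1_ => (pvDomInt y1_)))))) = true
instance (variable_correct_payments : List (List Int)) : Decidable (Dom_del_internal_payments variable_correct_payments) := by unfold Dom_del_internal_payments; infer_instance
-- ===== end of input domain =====

-- B replaces A's inner scan with a per-element counter and sentinel deletion by a single
-- guarded `del sub[1]` per sublist (objective: simpler). Both mutate sublists in place in
-- Python; the equivalence proved here is about the returned value.

-- ===== PORT A =====
-- Python's `for value in internal_index` over a list mutated by `del internal_index[1]`
-- advances an index over the current list; this is transliterated as an index/counter loop.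
def pvLoopA (l : List Int) (idx cont : Nat) : List Int :=
  if _h : idx < l.length then
    if cont = 1 then
      pvLoopA (l.eraseIdx 1) (idx + 1) (cont + 2)
    else
      pvLoopA l (idx + 1) (cont + 1)
  else l
termination_by l.length - idx
decreasing_by
  · have : (l.eraseIdx 1).length ≤ l.length := List.length_eraseIdx_le l 1
    omega
  · omega

def del_internal_payments (variable_correct_payments : List (List Int)) : List (List Int) :=
  variable_correct_payments.map (fun internal_index => pvLoopA internal_index 0 0)

-- ===== PORT B =====
def del_internal_payments_alt (variable_correct_payments : List (List Int)) : List (List Int) :=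
  variable_correct_payments.map (fun sub => if sub.length > 1 then sub.eraseIdx 1 else sub)

-- ===== PRECONDITION & SPEC =====
def Spec_del_internal_payments (variable_correct_payments : List (List Int)) (out : List (List Int)) : Prop := out = del_internal_payments_alt variable_correct_payments
instance (variable_correct_payments : List (List Int)) (out : List (List Int)) : Decidable (Spec_del_internal_payments variable_correct_payments out) := by unfold Spec_del_internal_payments; infer_instance

-- ===== CLAIM (what is proved, stated in full; the proofs are below) =====
def Claim_equal_del_internal_payments : Prop := ∀ (variable_correct_payments : List (List Int)), Dom_del_internal_payments variable_correct_payments → Spec_del_internal_payments variable_correct_payments (del_internal_payments variable_correct_payments)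

-- ===== LEMMAS AND PROOFS =====

-- Once cont ≥ 2 the branch `cont == 1` can never fire again, so the loop leaves the list alone.
theorem pvLoopA_stable (l : List Int) (idx cont : Nat) (h : 2 ≤ cont) : pvLoopA l idx cont = l := by
  induction l, idx, cont using pvLoopA.induct with
  | case1 l idx cont _h => omega
  | case2 l idx cont _h heq ih =>
      rw [pvLoopA]; simp [_h, heq]; exact ih (by omega)
  | case3 l idx cont _h =>
      rw [pvLoopA]; simp [_h]

theorem pvLoopA_eq (l : List Int) :
    pvLoopA l 0 0 = if l.length > 1 then l.eraseIdx 1 else l := by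
  by_cases h1 : 1 < l.length
  · have h0 : 0 < l.length := by omega
    rw [pvLoopA]; simp [h0]
    rw [pvLoopA]; simp [h1]
    simp [pvLoopA_stable (l.eraseIdx 1) 2 3 (by omega)]
  · simp [h1]
    rcases Nat.lt_or_ge l.length 1 with h0 | h0
    · rw [pvLoopA]; simp; omega
    · have h0' : 0 < l.length := by omega
      rw [pvLoopA]; simp [h0']
      rw [pvLoopA]; simp [h1]

-- ===== VERDICT (by name: the statement is the Claim_ definition above) =====
theorem del_internal_payments_spec : Claim_equal_del_internal_payments := by
  intro v _
  unfold Spec_del_internal_payments del_internal_payments del_internal_payments_alt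
  exact List.map_congr_left (fun l _ => pvLoopA_eq l)
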